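-- pv_equiv track=rewrite | github.com/connormdoane/aoc2024 | 01/code.py | part2
-- ===== SOURCE A (Python) =====
-- def part2(firstcol, secondcol):
--     similarity = 0
--     for first in firstcol:
--         times = 0
--         for second in secondcol:
--             if first == second:
--                 times += 1
--         similarity += first * times
--     return similarity
-- ===== SOURCE B (Python) =====
-- def _bisect_left(a, x):
--     lo, hi = 0, len(a)
--     while lo < hi:
--         mid = (lo + hi) // 2
--         if a[mid] < x:
--             lo = mid + 1
--         else:
--             hi = mid
--     return lo
--
--
-- def _bisect_right(a, x):
--     lo, hi = 0, len(a)
--     while lo < hi: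
--         mid = (lo + hi) // 2
--         if x < a[mid]:
--             hi = mid
--         else:
--             lo = mid + 1
--     return lo
--
--
-- def part2(firstcol, secondcol):
--     a = sorted(secondcol)
--     similarity = 0
--     for first in firstcol:
--         similarity += first * (_bisect_right(a, first) - _bisect_left(a, first))
--     return similarity
-- ===== Notes on version B (the rewrite author's own statement) =====
-- stated objective: faster
-- what changed: B sorts a copy of secondcol once and, for each element of firstcol, obtains its occurrence count as bisect_right - bisect_left by binary search on the sorted list, replacing A's inner linear scan of secondcol.
import Mathlib
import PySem

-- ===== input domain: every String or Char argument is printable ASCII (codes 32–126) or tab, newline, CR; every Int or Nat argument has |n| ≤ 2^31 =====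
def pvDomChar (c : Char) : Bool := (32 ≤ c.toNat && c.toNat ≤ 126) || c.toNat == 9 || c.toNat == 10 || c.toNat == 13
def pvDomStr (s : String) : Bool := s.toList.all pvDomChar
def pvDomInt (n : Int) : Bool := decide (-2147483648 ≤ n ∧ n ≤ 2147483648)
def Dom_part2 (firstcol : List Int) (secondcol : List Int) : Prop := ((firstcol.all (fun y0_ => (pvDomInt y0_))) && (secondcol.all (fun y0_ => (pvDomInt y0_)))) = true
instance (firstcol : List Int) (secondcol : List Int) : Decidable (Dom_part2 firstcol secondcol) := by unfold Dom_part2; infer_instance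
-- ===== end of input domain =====

-- B sorts a copy of secondcol once and gets each element's count by two binary searches
-- (bisect_right - bisect_left) instead of A's inner linear scan; objective: faster.

-- ===== PORT A =====
-- for first in firstcol: times = inner scan of secondcol; similarity += first * times
def part2 (firstcol : List Int) (secondcol : List Int) : Int :=
  firstcol.foldl
    (fun similarity first =>
      similarity + first * (secondcol.foldl (fun times second => if first = second then times + 1 else times) (0 : Int)))
    0

-- ===== PORT B =====
-- a = sorted(secondcol); the hand-written _bisect_left/_bisect_right while-loops of Source B are
-- exactly PySem.List.bisectLeft / bisectRight (same lo/hi/mid loop, same comparisons).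
def part2_alt (firstcol : List Int) (secondcol : List Int) : Int :=
  let a := PySem.List.sorted secondcol (fun v => v) false
  firstcol.foldl
    (fun similarity first =>
      similarity + first * ((PySem.List.bisectRight a first : Int) - (PySem.List.bisectLeft a first : Int)))
    0

-- ===== PRECONDITION & SPEC =====
def Spec_part2 (firstcol : List Int) (secondcol : List Int) (out : Int) : Prop := out = part2_alt firstcol secondcol
instance (firstcol : List Int) (secondcol : List Int) (out : Int) : Decidable (Spec_part2 firstcol secondcol out) := by unfold Spec_part2; infer_instance

-- ===== CLAIM (what is proved, stated in full; the proofs are below) =====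
def Claim_equal_part2 : Prop := ∀ (firstcol : List Int) (secondcol : List Int), Dom_part2 firstcol secondcol → Spec_part2 firstcol secondcol (part2 firstcol secondcol)

-- ===== LEMMAS AND PROOFS =====

-- A's inner loop over secondcol computes the multiplicity of `first` in secondcol.
theorem part2_inner_count (first : Int) (secondcol : List Int) (acc : Int) :
    secondcol.foldl (fun times second => if first = second then times + 1 else times) acc
      = acc + secondcol.count first := by
  induction secondcol generalizing acc with
  | nil => simp
  | cons s t ih =>
    simp only [List.foldl_cons, List.count_cons, ih]
    by_cases h : first = s
    · subst h; simp; ring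
    · simp [h, Ne.symm h]

-- If the indices where p holds are exactly those below K, then countP p = K.
theorem countP_eq_of_index (a : List Int) (p : Int → Bool) (K : Nat) (hK : K ≤ a.length)
    (h : ∀ j (hj : j < a.length), p a[j] ↔ j < K) : a.countP p = K := by
  induction a generalizing K with
  | nil => simp at hK ⊢; omega
  | cons x t ih =>
    cases K with
    | zero =>
      have hx : p x = false := by
        have := h 0 (by simp); simpa using this
      rw [List.countP_cons_of_neg (pa := by simp [hx])]
      exact ih 0 (by omega) (fun j hj => by
        have := h (j + 1) (by simpa using Nat.succ_lt_succ hj)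
        simpa using this)
    | succ K' =>
      have hx : p x = true := by
        have := h 0 (by simp); simpa using this
      rw [List.countP_cons_of_pos (pa := by simp [hx])]
      rw [ih K' (by simpa using hK) (fun j hj => by
        have := h (j + 1) (by simpa using Nat.succ_lt_succ hj)
        simpa using this)]

-- countP (≤ x) splits into countP (< x) plus the multiplicity of x.
theorem countP_le_split (a : List Int) (x : Int) :
    a.countP (fun v => decide (v ≤ x)) = a.countP (fun v => decide (v < x)) + a.count x := by
  induction a with
  | nil => simp
  | cons y t ih =>
    simp only [List.countP_cons, List.count_cons, ih]
    by_cases h1 : y = x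
    · subst h1; simp; omega
    · by_cases h2 : y < x
      · simp [h2, le_of_lt h2, h1]; omega
      · have : ¬ y ≤ x := fun hle => h2 (lt_of_le_of_ne hle h1)
        simp [h2, this, h1]

-- On the sorted copy of s, bisectRight - bisectLeft is the multiplicity of x in s.
theorem bisect_count (s : List Int) (x : Int) :
    ((PySem.List.bisectRight (PySem.List.sorted s (fun v => v) false) x : Int)
      - (PySem.List.bisectLeft (PySem.List.sorted s (fun v => v) false) x : Int))
      = (s.count x : Int) := by
  set a := PySem.List.sorted s (fun v => v) false with ha
  have hpw : a.Pairwise (fun u v => u ≤ v) := PySem.List.sorted_pairwise s (fun v => v)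
  obtain ⟨hL1, hL2, hL3⟩ := PySem.List.bisectLeft_spec a x hpw
  obtain ⟨hR1, hR2, hR3⟩ := PySem.List.bisectRight_spec a x hpw
  have hLc : a.countP (fun v => decide (v < x)) = PySem.List.bisectLeft a x :=
    countP_eq_of_index a _ _ hL1 (fun j hj => by
      constructor
      · intro hp
        by_contra hge
        have := hL3 j hj (by omega)
        simp at hp; omega
      · intro hlt; simpa using hL2 j hj hlt)
  have hRc : a.countP (fun v => decide (v ≤ x)) = PySem.List.bisectRight a x :=
    countP_eq_of_index a _ _ hR1 (fun j hj => by
      constructor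
      · intro hp
        by_contra hge
        have := hR3 j hj (by omega)
        simp at hp; omega
      · intro hlt; simpa using hR2 j hj hlt)
  have hcount : a.count x = s.count x :=
    (PySem.List.sorted_perm s (fun v => v) false).count_eq x
  have := countP_le_split a x
  rw [hLc, hRc, hcount] at this
  omega

-- ===== VERDICT (by name: the statement is the Claim_ definition above) =====
theorem part2_spec : Claim_equal_part2 := by
  intro firstcol secondcol _
  unfold Spec_part2 part2 part2_alt
  simp only [part2_inner_count, zero_add, bisect_count]
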